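-- pv_equiv track=rewrite | github.com/nirlan/estudos-python | trabalho_exercicio3.py | atualiza_quartos
-- ===== SOURCE A (Python) =====
-- def atualiza_quartos(quartos: list[list[str]], jogadas: dict[int, str]):
--     """
--     Função que atualiza a ocupação dos quartos conforme a escolha feita pelo
--     usuário.
--     :param quartos: lista de listas com a disposição da ocupação dos quartos
--     :param jogadas: dicionário contendo como chave a posição do hóspede que foi
--     escolhida pelo usuário e como valor a string que representa o hóspede
--     :return: uma lista com a configuração atualizada da ocupação dos quartos
--     """
--     contador = 1
--     for i in range(len(quartos)):
--         for j in range(len(quartos[i])):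
--             if quartos[i][j] in '-' and contador in jogadas.keys():
--                 quartos[i][j] = jogadas[contador]
--             contador += 1
--     return quartos
-- ===== SOURCE B (Python) =====
-- def atualiza_quartos(quartos: list[list[str]], jogadas: dict[int, str]):
--     """Update the room grid from the jogadas side: build prefix sums of the
--     row lengths once, then for each played 1-based flat position binary-search
--     its row and update that single free ('-') cell.  Mutates quartos."""
--     prefix = [0]
--     for row in quartos:
--         prefix.append(prefix[-1] + len(row))
--     total = prefix[-1]
--     for pos, hospede in jogadas.items():
--         if 1 <= pos <= total:
--             p = pos - 1
--             lo, hi = 0, len(quartos)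
--             while hi - lo > 1:
--                 mid = (lo + hi) // 2
--                 if prefix[mid] <= p:
--                     lo = mid
--                 else:
--                     hi = mid
--             row = quartos[lo]
--             j = p - prefix[lo]
--             if row[j] == '-':
--                 row[j] = hospede
--     return quartos
-- ===== Notes on version B (the rewrite author's own statement) =====
-- stated objective: alternative
-- what changed: Instead of scanning every grid cell with a running counter and testing it against the dict, B builds prefix sums of the row lengths once and, for each jogada, binary-searches the row of its 1-based flat position and updates that single cell; Pre_ excludes association lists with duplicate keys, which cannot arise from a Python dict.
-- intended difference: On grids containing an empty-string cell whose flat position is a jogadas key with a non-empty value, A overwrites that cell (its test `cell in '-'` is accidentally True for ''), while B leaves it unchanged, which is intended since only '-' marks a free room. — e.g. on atualiza_quartos([["-", ""]], [(2, "H")]): A returns [["-", "H"]], B returns [["-", ""]]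
import Mathlib
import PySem

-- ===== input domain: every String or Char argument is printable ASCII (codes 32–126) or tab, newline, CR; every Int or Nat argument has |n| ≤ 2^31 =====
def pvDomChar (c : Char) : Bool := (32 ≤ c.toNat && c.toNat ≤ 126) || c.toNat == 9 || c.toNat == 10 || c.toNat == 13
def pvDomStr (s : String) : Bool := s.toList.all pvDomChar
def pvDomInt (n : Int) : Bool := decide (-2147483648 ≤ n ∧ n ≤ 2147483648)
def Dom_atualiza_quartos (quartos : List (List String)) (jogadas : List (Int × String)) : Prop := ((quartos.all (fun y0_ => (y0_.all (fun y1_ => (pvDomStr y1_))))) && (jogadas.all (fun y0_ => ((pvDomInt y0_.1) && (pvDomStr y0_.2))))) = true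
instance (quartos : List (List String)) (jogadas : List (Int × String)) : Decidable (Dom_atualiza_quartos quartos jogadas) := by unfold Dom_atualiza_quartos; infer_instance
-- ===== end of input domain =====

-- B works from the jogadas side (prefix-sum row offsets + a binary search per jogada) instead
-- of scanning every cell; both mutate quartos the same way in Python; B only fills cells
-- equal to '-' where A also accidentally fills empty-string cells (stated as D_ below).

-- ===== PORT A =====
-- one cell update: `if quartos[i][j] in '-' and contador in jogadas.keys(): quartos[i][j] = jogadas[contador]`
def aqCellA (jog : PySem.Dict Int String) (x : String) (c : Int) : String :=
  if PySem.Str.isIn x "-" && jog.contains c then jog.getD c x else x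

-- inner `for j in range(len(quartos[i]))` loop: state = (row cells, contador)
def aqRowA (jog : PySem.Dict Int String) : List String → Int → List String × Int
  | [], c => ([], c)
  | x :: xs, c =>
    let r := aqRowA jog xs (c + 1)
    (aqCellA jog x c :: r.1, r.2)

-- outer `for i in range(len(quartos))` loop, threading contador
def aqGridA (jog : PySem.Dict Int String) : List (List String) → Int → List (List String)
  | [], _ => []
  | row :: rest, c =>
    let r := aqRowA jog row c
    r.1 :: aqGridA jog rest r.2

def atualiza_quartos (quartos : List (List String)) (jogadas : List (Int × String)) : List (List String) :=
  aqGridA (PySem.Dict.mk jogadas) quartos 1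

-- ===== PORT B =====
-- `row[j] == '-'`
def aqSubB (x : String) : Bool := x == "-"

-- `prefix = [0]; for row in quartos: prefix.append(prefix[-1] + len(row))`
def aqPrefix (quartos : List (List String)) : List Int :=
  quartos.foldl (fun acc row => acc ++ [PySem.List.pyGetD acc (-1) 0 + (row.length : Int)]) [0]

-- `lo, hi = 0, len(quartos); while hi - lo > 1: ...`
-- (the fuel argument is a totality guard only: hi - lo shrinks every iteration,
-- so fuel = the initial interval width is never exhausted)
def aqSearch (pre : List Int) (p : Int) : Nat → Int → Int → Int
  | 0, lo, _ => lo
  | fuel + 1, lo, hi =>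
    if 1 < hi - lo then
      let mid := PySem.Int.floordiv (lo + hi) 2
      if PySem.List.pyGetD pre mid 0 ≤ p then aqSearch pre p fuel mid hi
      else aqSearch pre p fuel lo mid
    else lo

-- one iteration of `for pos, hospede in jogadas.items(): ...`
def aqApply (pre : List Int) (total : Int) (q : List (List String)) (kv : Int × String) : List (List String) :=
  if 1 ≤ kv.1 && kv.1 ≤ total then
    let p := kv.1 - 1
    let lo := aqSearch pre p q.length 0 (q.length : Int)
    let row := PySem.List.pyGetD q lo []
    let j := p - PySem.List.pyGetD pre lo 0
    if aqSubB (PySem.List.pyGetD row j "") then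
      PySem.List.pySetD q lo (PySem.List.pySetD row j kv.2)
    else q
  else q

def atualiza_quartos_alt (quartos : List (List String)) (jogadas : List (Int × String)) : List (List String) :=
  let pre := aqPrefix quartos
  let total := PySem.List.pyGetD pre (-1) 0
  (PySem.Dict.mk jogadas).items.foldl (aqApply pre total) quartos

-- ===== PRECONDITION & SPEC =====
-- Pre_ excludes jogadas whose association list repeats a key: a Python dict can never contain
-- duplicate keys, they exist only in the List (Int × String) encoding, where A's first-match
-- lookup and B's sequential application may disagree.
def Pre_atualiza_quartos (quartos : List (List String)) (jogadas : List (Int × String)) : Prop :=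
  (jogadas.map Prod.fst).Nodup
instance (quartos : List (List String)) (jogadas : List (Int × String)) : Decidable (Pre_atualiza_quartos quartos jogadas) := by unfold Pre_atualiza_quartos; infer_instance

def pvWitness_atualiza_quartos : List (List String) × (List (Int × String)) :=
  ([["-", "X"], ["-"]], [(1, "H"), (3, "J")])

-- On grids containing an empty-string cell whose flat position is a jogadas key with a
-- non-empty value, A overwrites that cell (its test `cell in '-'` is accidentally True for ''),
-- while B leaves it unchanged, which is intended since only '-' marks a free room.
def D_atualiza_quartos (quartos : List (List String)) (jogadas : List (Int × String)) : Prop :=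
  ∃ j < quartos.flatten.length, quartos.flatten.getD j "" = "" ∧
    ((PySem.Dict.mk jogadas).get? ((j : Int) + 1)).getD "" ≠ ""
instance (quartos : List (List String)) (jogadas : List (Int × String)) : Decidable (D_atualiza_quartos quartos jogadas) := by unfold D_atualiza_quartos; infer_instance

def Spec_atualiza_quartos (quartos : List (List String)) (jogadas : List (Int × String)) (out : List (List String)) : Prop := ¬ D_atualiza_quartos quartos jogadas → out = atualiza_quartos_alt quartos jogadas
instance (quartos : List (List String)) (jogadas : List (Int × String)) (out : List (List String)) : Decidable (Spec_atualiza_quartos quartos jogadas out) := by unfold Spec_atualiza_quartos; infer_instance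

def pvDiffWitness_atualiza_quartos : List (List String) × (List (Int × String)) :=
  ([["-", ""]], [(2, "H")])
def pvDiffWitnessOut_atualiza_quartos : (List (List String)) × (List (List String)) :=
  ([["-", "H"]], [["-", ""]])

-- ===== CLAIM (what is proved, stated in full; the proofs are below) =====
def Claim_unchanged_atualiza_quartos : Prop := ∀ (quartos : List (List String)) (jogadas : List (Int × String)), Dom_atualiza_quartos quartos jogadas → Pre_atualiza_quartos quartos jogadas → Spec_atualiza_quartos quartos jogadas (atualiza_quartos quartos jogadas)
def Claim_changed_atualiza_quartos : Prop := Dom_atualiza_quartos (pvDiffWitness_atualiza_quartos.1) (pvDiffWitness_atualiza_quartos.2) ∧ Pre_atualiza_quartos (pvDiffWitness_atualiza_quartos.1) (pvDiffWitness_atualiza_quartos.2) ∧ D_atualiza_quartos (pvDiffWitness_atualiza_quartos.1) (pvDiffWitness_atualiza_quartos.2) ∧ atualiza_quartos (pvDiffWitness_atualiza_quartos.1) (pvDiffWitness_atualiza_quartos.2) = pvDiffWitnessOut_atualiza_quartos.1 ∧ atualiza_quartos_alt (pvDiffWitness_atualiza_quartos.1) (pvDiffWitness_atualiza_quartos.2)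 = pvDiffWitnessOut_atualiza_quartos.2 ∧ pvDiffWitnessOut_atualiza_quartos.1 ≠ pvDiffWitnessOut_atualiza_quartos.2
def Claim_exact_atualiza_quartos : Prop := ∀ (quartos : List (List String)) (jogadas : List (Int × String)), Dom_atualiza_quartos quartos jogadas → Pre_atualiza_quartos quartos jogadas → D_atualiza_quartos quartos jogadas → atualiza_quartos quartos jogadas ≠ atualiza_quartos_alt quartos jogadas

-- ===== LEMMAS AND PROOFS =====

-- B's cell semantics (proof helper): fill the cell iff it is exactly "-"
def aqCellB (jog : PySem.Dict Int String) (x : String) (c : Int) : String :=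
  if aqSubB x && jog.contains c then jog.getD c x else x

-- flat offset of the first cell of row i (sum of the lengths of the rows before it)
def aqT (lens : List Nat) (i : Nat) : Int := (((lens.take i).sum : Nat) : Int)

-- ---- flattened-grid view used by D_ ----
lemma aqFlat_bound (q : List (List String)) (i : Nat) (hi : i < q.length)
    (jj : Nat) (hjj : jj < (q[i]'hi).length) :
    ((q.map List.length).take i).sum + jj < q.flatten.length := by
  rw [List.length_flatten]
  have hsp := List.sum_take_succ (q.map List.length) i (by simpa using hi)
  have hgi : (q.map List.length)[i]'(by simpa using hi) = (q[i]'hi).length := by simp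
  have hle : ((q.map List.length).take (i + 1)).sum ≤ (q.map List.length).sum := by
    conv_rhs => rw [← List.take_append_drop (i + 1) (q.map List.length)]
    rw [List.sum_append]
    omega
  omega

lemma aqFlat_getElem (q : List (List String)) (i : Nat) (hi : i < q.length)
    (jj : Nat) (hjj : jj < (q[i]'hi).length) :
    q.flatten.getD (((q.map List.length).take i).sum + jj) "" = (q[i]'hi)[jj]'hjj := by
  induction q generalizing i with
  | nil => exact absurd hi (by simp)
  | cons row rest ih =>
    cases i with
    | zero =>
      have hjr : jj < row.length := by simpa using hjj
      simp only [List.take_zero, List.sum_nil, Nat.zero_add, List.flatten_cons,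
        List.getD_eq_getElem?_getD]
      rw [List.getElem?_append_left hjr, List.getElem?_eq_getElem hjr]
      simp
    | succ i =>
      have hi' : i < rest.length := by simpa using hi
      have hjj' : jj < (rest[i]'hi').length := by simpa using hjj
      simp only [List.map_cons, List.take_succ_cons, List.sum_cons, List.flatten_cons,
        List.getD_eq_getElem?_getD]
      rw [List.getElem?_append_right (by omega)]
      rw [show row.length + ((rest.map List.length).take i).sum + jj - row.length
            = ((rest.map List.length).take i).sum + jj by omega]
      have := ih i hi' hjj'
      rw [List.getD_eq_getElem?_getD] at this
      simpa using this

lemma aqFlat_decomp (q : List (List String)) (p : Nat) (hp : p < q.flatten.length) :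
    ∃ i, ∃ hi : i < q.length, ∃ jj, jj < (q[i]'hi).length ∧
      p = ((q.map List.length).take i).sum + jj := by
  induction q generalizing p with
  | nil => simp at hp
  | cons row rest ih =>
    rw [List.flatten_cons, List.length_append] at hp
    by_cases hlt : p < row.length
    · exact ⟨0, by simp, p, by simpa using hlt, by simp⟩
    · obtain ⟨i, hi, jj, hjj, hdec⟩ := ih (p - row.length) (by omega)
      refine ⟨i + 1, by simpa using hi, jj, by simpa using hjj, ?_⟩
      simp only [List.map_cons, List.take_succ_cons, List.sum_cons]
      omega

-- the common shape: map every cell with its 1-based flat position through a cell function f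
def aqRowSpec (f : String → Int → String) : List String → Int → List String
  | [], _ => []
  | x :: xs, c => f x c :: aqRowSpec f xs (c + 1)

def aqGridSpec (f : String → Int → String) : List (List String) → Int → List (List String)
  | [], _ => []
  | row :: rest, c => aqRowSpec f row c :: aqGridSpec f rest (c + (row.length : Int))

-- prefix sums of the row lengths
def aqScanN : List Nat → Int → List Int
  | [], s => [s]
  | m :: rest, s => s :: aqScanN rest (s + (m : Int))

-- `x in '-'` holds exactly for '' and '-'
lemma aq_isIn_dash (x : String) : PySem.Str.isIn x "-" = (x == "" || x == "-") := by
  rcases hb : PySem.Str.isIn x "-" with _ | _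
  · rcases hc : (x == "" || x == "-") with _ | _
    · rfl
    · exfalso
      have : PySem.Str.isIn x "-" = true := by
        rw [PySem.Str.isIn_iff_infix]
        rcases Bool.or_eq_true_iff.mp hc with h | h
        · have : x = "" := by simpa using h
          subst this; simp
        · have : x = "-" := by simpa using h
          subst this; simp
      rw [this] at hb; exact Bool.noConfusion hb
  · have h := (PySem.Str.isIn_iff_infix x "-").mp hb
    have hs := h.sublist
    rcases List.sublist_singleton.mp hs with h1 | h1
    · have : x = "" := by
        have : String.ofList x.toList = String.ofList [] := congrArg _ h1
        simpa using this
      subst this; rfl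
    · have : x = "-" := by
        have : String.ofList x.toList = String.ofList ['-'] := congrArg _ h1
        simpa using this
      subst this; rfl

-- the two cell updates through get?
lemma aqCellA_eq (jog : PySem.Dict Int String) (x : String) (c : Int) :
    aqCellA jog x c = if PySem.Str.isIn x "-" = true then (jog.get? c).getD x else x := by
  unfold aqCellA
  rw [PySem.Dict.contains_eq_isSome_get?, PySem.Dict.getD_eq_get?_getD]
  cases h : jog.get? c <;> cases hi : PySem.Str.isIn x "-" <;> simp [h, hi]

lemma aqCellB_eq (jog : PySem.Dict Int String) (x : String) (c : Int) :
    aqCellB jog x c = if (x == "-") = true then (jog.get? c).getD x else x := by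
  unfold aqCellB aqSubB
  rw [PySem.Dict.contains_eq_isSome_get?, PySem.Dict.getD_eq_get?_getD]
  cases h : jog.get? c <;> cases hi : (x == "-") <;> simp [h, hi]

-- the two cells agree wherever a present value for an empty-string cell is itself empty
lemma aqCell_agree (jog : PySem.Dict Int String) (x : String) (c : Int)
    (h : x = "" → (jog.get? c).getD "" = "") : aqCellA jog x c = aqCellB jog x c := by
  rw [aqCellA_eq, aqCellB_eq, aq_isIn_dash]
  by_cases hx : x = ""
  · subst hx
    simp only [beq_self_eq_true, Bool.true_or, if_true]
    have hxd : (("" : String) == "-") = false := by decide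
    rw [hxd, if_neg (by simp)]
    exact h rfl
  · have hxe : (x == "") = false := by simpa using hx
    simp [hxe]

-- ---- prefix sums ----
lemma aqT_zero (lens : List Nat) : aqT lens 0 = 0 := by simp [aqT]

lemma aqT_cons_succ (m : Nat) (rest : List Nat) (i : Nat) :
    aqT (m :: rest) (i + 1) = (m : Int) + aqT rest i := by
  simp [aqT, List.take_succ_cons]

lemma aqT_succ (lens : List Nat) (i : Nat) (h : i < lens.length) :
    aqT lens (i + 1) = aqT lens i + (lens[i] : Int) := by
  simp only [aqT]
  rw [List.sum_take_succ lens i h]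
  push_cast; ring

lemma aqT_mono (lens : List Nat) {i j : Nat} (h : i ≤ j) : aqT lens i ≤ aqT lens j := by
  simp only [aqT, Int.ofNat_le]
  have h1 : lens.take i = (lens.take j).take i := by rw [List.take_take, min_eq_left h]
  rw [h1]
  conv_rhs => rw [← List.take_append_drop i (lens.take j)]
  rw [List.sum_append]
  omega

lemma aqT_nonneg (lens : List Nat) (i : Nat) : 0 ≤ aqT lens i := by
  exact Int.natCast_nonneg _

lemma aqT_unique (lens : List Nat) (p : Int) (a b : Nat)
    (ha1 : aqT lens a ≤ p) (ha2 : p < aqT lens (a + 1))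
    (hb1 : aqT lens b ≤ p) (hb2 : p < aqT lens (b + 1)) : a = b := by
  rcases lt_trichotomy a b with h | h | h
  · have := aqT_mono lens (show a + 1 ≤ b by omega); omega
  · exact h
  · have := aqT_mono lens (show b + 1 ≤ a by omega); omega

lemma aqScanN_length (lens : List Nat) (s : Int) : (aqScanN lens s).length = lens.length + 1 := by
  induction lens generalizing s with
  | nil => simp [aqScanN]
  | cons m rest ih => simp [aqScanN, ih]

lemma aqScanN_getElem (lens : List Nat) (s : Int) (i : Nat) (h : i < (aqScanN lens s).length) :
    (aqScanN lens s)[i] = s + aqT lens i := by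
  induction lens generalizing s i with
  | nil =>
    simp [aqScanN] at h
    subst h
    simp [aqScanN, aqT_zero]
  | cons m rest ih =>
    cases i with
    | zero => simp [aqScanN, aqT_zero]
    | succ i =>
      have h' : i < (aqScanN rest (s + (m : Int))).length := by
        simp [aqScanN_length] at h ⊢; omega
      have := ih (s + (m : Int)) i h'
      simp only [aqScanN, List.getElem_cons_succ, this, aqT_cons_succ]
      ring

lemma aqScanN_getLast (lens : List Nat) (s : Int) (h : aqScanN lens s ≠ []) :
    (aqScanN lens s).getLast h = s + aqT lens lens.length := by
  rw [List.getLast_eq_getElem]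
  have hl : (aqScanN lens s).length - 1 = lens.length := by rw [aqScanN_length]; omega
  rw [aqScanN_getElem lens s _ (by rw [aqScanN_length]; omega)]
  rw [hl]

lemma aqPrefix_go (rows : List (List String)) : ∀ (acc : List Int) (s : Int),
    rows.foldl (fun acc row => acc ++ [PySem.List.pyGetD acc (-1) 0 + (row.length : Int)]) (acc ++ [s])
      = acc ++ aqScanN (rows.map List.length) s := by
  induction rows with
  | nil => intro acc s; simp [aqScanN]
  | cons row rest ih =>
    intro acc s
    simp only [List.foldl_cons, List.map_cons, aqScanN]
    rw [PySem.List.pyGetD_neg_one_append_singleton]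
    have h2 := ih (acc ++ [s]) (s + (row.length : Int))
    simp only [List.append_assoc, List.singleton_append] at h2 ⊢
    exact h2

lemma aqPrefix_eq (rows : List (List String)) :
    aqPrefix rows = aqScanN (rows.map List.length) 0 := by
  have h := aqPrefix_go rows [] 0
  simpa [aqPrefix] using h

-- ---- binary search ----
lemma aqSearch_spec (lens : List Nat) (p : Int) (fuel : Nat) : ∀ (lo hi : Int),
    (hi - lo).toNat ≤ fuel + 1 → 0 ≤ lo → lo < hi → hi ≤ (lens.length : Int) →
    aqT lens lo.toNat ≤ p → p < aqT lens hi.toNat →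
    ∃ r : Nat, aqSearch (aqScanN lens 0) p fuel lo hi = (r : Int) ∧ r < lens.length ∧
      aqT lens r ≤ p ∧ p < aqT lens (r + 1) := by
  have hlen : ((aqScanN lens 0).length : Int) = (lens.length : Int) + 1 := by
    rw [aqScanN_length]; push_cast; ring
  induction fuel with
  | zero =>
    intro lo hi hf h0 h1 h2 h3 h4
    have hhl : hi = lo + 1 := by omega
    refine ⟨lo.toNat, ?_, by omega, h3, ?_⟩
    · show aqSearch (aqScanN lens 0) p 0 lo hi = (lo.toNat : Int)
      simp only [aqSearch]
      omega
    · have h5 : hi.toNat = lo.toNat + 1 := by omega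
      rw [h5] at h4
      exact h4
  | succ fuel ih =>
    intro lo hi hf h0 h1 h2 h3 h4
    by_cases hgt : 1 < hi - lo
    · have hmid : PySem.Int.floordiv (lo + hi) 2 = (lo + hi) / 2 :=
        PySem.Int.floordiv_eq_ediv_of_pos (by norm_num)
      have hm0 : 0 ≤ PySem.Int.floordiv (lo + hi) 2 := by omega
      have hm1 : PySem.Int.floordiv (lo + hi) 2 < ((aqScanN lens 0).length : Int) := by omega
      have hget : PySem.List.pyGetD (aqScanN lens 0) (PySem.Int.floordiv (lo + hi) 2) 0
          = aqT lens (PySem.Int.floordiv (lo + hi) 2).toNat := by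
        rw [PySem.List.pyGetD_eq_getElem _ _ hm0 hm1, aqScanN_getElem]
        ring
      by_cases hle : PySem.List.pyGetD (aqScanN lens 0) (PySem.Int.floordiv (lo + hi) 2) 0 ≤ p
      · obtain ⟨r, hr0, hr1, hr2, hr3⟩ :=
          ih (PySem.Int.floordiv (lo + hi) 2) hi (by omega) (by omega) (by omega) h2
            (by rw [hget] at hle; exact hle) h4
        exact ⟨r, by simp only [aqSearch, if_pos hgt, if_pos hle]; exact hr0, hr1, hr2, hr3⟩
      · have hlt : p < PySem.List.pyGetD (aqScanN lens 0) (PySem.Int.floordiv (lo + hi) 2) 0 :=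
          not_le.mp hle
        obtain ⟨r, hr0, hr1, hr2, hr3⟩ :=
          ih lo (PySem.Int.floordiv (lo + hi) 2) (by omega) h0 (by omega) (by omega) h3
            (by rw [hget] at hlt; exact hlt)
        exact ⟨r, by simp only [aqSearch, if_pos hgt, if_neg hle]; exact hr0, hr1, hr2, hr3⟩
    · refine ⟨lo.toNat, ?_, by omega, h3, ?_⟩
      · show aqSearch (aqScanN lens 0) p (fuel + 1) lo hi = (lo.toNat : Int)
        simp only [aqSearch, if_neg hgt]
        omega
      · have h5 : hi.toNat = lo.toNat + 1 := by omega
        rw [h5] at h4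
        exact h4

-- ---- the common spec ----
lemma aqRowSpec_length (f : String → Int → String) (row : List String) (c : Int) :
    (aqRowSpec f row c).length = row.length := by
  induction row generalizing c with
  | nil => rfl
  | cons x xs ih => simp [aqRowSpec, ih]

lemma aqRowSpec_getElem (f : String → Int → String) (row : List String) (c : Int)
    (jj : Nat) (h : jj < (aqRowSpec f row c).length) :
    (aqRowSpec f row c)[jj] =
      f (row[jj]'(by rw [aqRowSpec_length] at h; exact h)) (c + jj) := by
  induction row generalizing c jj with
  | nil => simp [aqRowSpec_length] at h
  | cons x xs ih =>
    cases jj with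
    | zero => simp [aqRowSpec]
    | succ jj =>
      have h' : jj < (aqRowSpec f xs (c + 1)).length := by
        simp [aqRowSpec_length] at h ⊢; omega
      have := ih (c + 1) jj h'
      simp only [aqRowSpec, List.getElem_cons_succ, this]
      congr 1
      push_cast; ring

lemma aqGridSpec_length (f : String → Int → String) (rows : List (List String)) (c : Int) :
    (aqGridSpec f rows c).length = rows.length := by
  induction rows generalizing c with
  | nil => rfl
  | cons row rest ih => simp [aqGridSpec, ih]

lemma aqGridSpec_getElem (f : String → Int → String) (rows : List (List String)) (c : Int)
    (i : Nat) (h : i < (aqGridSpec f rows c).length) :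
    (aqGridSpec f rows c)[i] =
      aqRowSpec f (rows[i]'(by rw [aqGridSpec_length] at h; exact h))
        (c + aqT (rows.map List.length) i) := by
  induction rows generalizing c i with
  | nil => simp [aqGridSpec_length] at h
  | cons row rest ih =>
    cases i with
    | zero => simp [aqGridSpec, aqT_zero]
    | succ i =>
      have h' : i < (aqGridSpec f rest (c + (row.length : Int))).length := by
        simp [aqGridSpec_length] at h ⊢; omega
      have := ih (c + (row.length : Int)) i h'
      simp only [aqGridSpec, List.getElem_cons_succ, this, List.map_cons, aqT_cons_succ]
      congr 1
      ring

-- ---- A computes the spec with cell function aqCellA ----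
lemma aqRowA_eq (jog : PySem.Dict Int String) (row : List String) (c : Int) :
    aqRowA jog row c = (aqRowSpec (aqCellA jog) row c, c + (row.length : Int)) := by
  induction row generalizing c with
  | nil => simp [aqRowA, aqRowSpec]
  | cons x xs ih => simp [aqRowA, aqRowSpec, ih]; ring

lemma aqGridA_eq (jog : PySem.Dict Int String) (rows : List (List String)) (c : Int) :
    aqGridA jog rows c = aqGridSpec (aqCellA jog) rows c := by
  induction rows generalizing c with
  | nil => rfl
  | cons row rest ih => simp [aqGridA, aqGridSpec, aqRowA_eq, ih]

-- ---- the empty dict changes nothing ----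
lemma aqRowSpec_empty (row : List String) (c : Int) :
    aqRowSpec (aqCellB (PySem.Dict.mk ([] : List (Int × String)))) row c = row := by
  induction row generalizing c with
  | nil => rfl
  | cons x xs ih =>
    have hc : aqCellB (PySem.Dict.mk ([] : List (Int × String))) x c = x := by
      rw [aqCellB_eq]
      have : (PySem.Dict.mk ([] : List (Int × String))).get? c = none := rfl
      rw [this]
      split <;> rfl
    simp [aqRowSpec, hc, ih]

lemma aqGridSpec_empty (rows : List (List String)) (c : Int) :
    aqGridSpec (aqCellB (PySem.Dict.mk ([] : List (Int × String)))) rows c = rows := by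
  induction rows generalizing c with
  | nil => rfl
  | cons row rest ih => simp [aqGridSpec, aqRowSpec_empty, ih]

-- ---- characterize one aqApply step ----
lemma aqApply_invalid (pre : List Int) (total : Int) (q : List (List String)) (k : Int) (v : String)
    (h : ¬ (1 ≤ k ∧ k ≤ total)) : aqApply pre total q (k, v) = q := by
  unfold aqApply
  have hc : (decide (1 ≤ k) && decide (k ≤ total)) = false := by
    rcases not_and_or.mp h with h1 | h1 <;> simp [h1]
  simp only [hc]
  rfl

lemma aqApply_valid (lens : List Nat) (q : List (List String)) (hq : q.map List.length = lens)
    (k : Int) (v : String) (hk1 : 1 ≤ k) (hk2 : k ≤ aqT lens lens.length) :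
    ∃ (r j : Nat) (hr : r < q.length) (hj : j < (q[r]'hr).length),
      aqT lens r + (j : Int) = k - 1 ∧
      aqApply (aqScanN lens 0) (aqT lens lens.length) q (k, v) =
        (if aqSubB ((q[r]'hr)[j]'hj) then q.set r ((q[r]'hr).set j v) else q) := by
  have hlnil : lens ≠ [] := by
    intro hn; subst hn; simp [aqT] at hk2; omega
  have hlpos : 0 < lens.length := List.length_pos_iff.mpr hlnil
  have hqlen : q.length = lens.length := by
    have := congrArg List.length hq; simpa using this
  obtain ⟨r, hs, hr, hr1, hr2⟩ :=
    aqSearch_spec lens (k - 1) q.length 0 (lens.length : Int)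
      (by omega) le_rfl (by exact_mod_cast hlpos) le_rfl
      (by simpa [aqT_zero] using (by omega : (0:Int) ≤ k - 1))
      (by simpa using (by omega : k - 1 < aqT lens lens.length))
  have hrq : r < q.length := by omega
  have hrlen : lens[r] = (q[r]'hrq).length := by subst hq; simp
  have hsucc := aqT_succ lens r hr
  have hjnn : 0 ≤ k - 1 - aqT lens r := by omega
  have hjlt : k - 1 - aqT lens r < (lens[r] : Int) := by omega
  refine ⟨r, (k - 1 - aqT lens r).toNat, hrq, by omega, by omega, ?_⟩
  have hc : (decide (1 ≤ k) && decide (k ≤ aqT lens lens.length)) = true := by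
    simp [hk1, hk2]
  have hcast : ((q.length : Int)) = ((lens.length : Int)) := by exact_mod_cast hqlen
  have hs' : aqSearch (aqScanN lens 0) (k - 1) q.length 0 ((q.length : Int)) = (r : Int) := by
    rw [hcast]; exact hs
  have hpreget : PySem.List.pyGetD (aqScanN lens 0) ((r : Int)) 0 = aqT lens r := by
    rw [PySem.List.pyGetD_natCast, List.getD_eq_getElem _ _ (by rw [aqScanN_length]; omega),
      aqScanN_getElem]
    ring
  have hrowget : PySem.List.pyGetD q ((r : Int)) [] = q[r]'hrq := by
    rw [PySem.List.pyGetD_natCast]; exact List.getD_eq_getElem q [] hrq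
  have hjcast : k - 1 - aqT lens r = ((k - 1 - aqT lens r).toNat : Int) := by omega
  have hcell : PySem.List.pyGetD (q[r]'hrq) (k - 1 - aqT lens r) "" = (q[r]'hrq)[(k - 1 - aqT lens r).toNat]'(by omega) :=
    PySem.List.pyGetD_eq_getElem _ "" hjnn (by omega)
  have hsetrow : PySem.List.pySetD (q[r]'hrq) (k - 1 - aqT lens r) v = (q[r]'hrq).set (k - 1 - aqT lens r).toNat v :=
    PySem.List.pySetD_of_nonneg _ _ hjnn
  have hsetgrid : ∀ (row : List String), PySem.List.pySetD q ((r : Int)) row = q.set r row := by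
    intro row
    rw [PySem.List.pySetD_of_nonneg _ _ (by positivity)]
    simp
  simp only [aqApply, hc, if_true]
  rw [hs', hrowget, hpreget, hcell, hsetrow, hsetgrid]

-- ---- the fold over jogadas computes the spec with cell function aqCellB ----
-- generic two-sided extensionality for aqGridSpec
lemma aqGridSpec_ext (f1 f2 : String → Int → String) (x y : List (List String)) (c : Int)
    (hL : x.length = y.length)
    (hlen : ∀ (i : Nat) (h1 : i < x.length) (h2 : i < y.length), (x[i]'h1).length = (y[i]'h2).length)
    (hcell : ∀ (i jj : Nat) (h1 : i < x.length) (h2 : i < y.length)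
      (g1 : jj < (x[i]'h1).length) (g2 : jj < (y[i]'h2).length),
      f1 ((x[i]'h1)[jj]'g1) (c + aqT (x.map List.length) i + jj)
        = f2 ((y[i]'h2)[jj]'g2) (c + aqT (y.map List.length) i + jj)) :
    aqGridSpec f1 x c = aqGridSpec f2 y c := by
  apply List.ext_getElem
  · rw [aqGridSpec_length, aqGridSpec_length, hL]
  · intro i h1 h2
    rw [aqGridSpec_getElem, aqGridSpec_getElem]
    apply List.ext_getElem
    · rw [aqRowSpec_length, aqRowSpec_length]
      exact hlen i _ _
    · intro jj g1 g2
      rw [aqRowSpec_getElem, aqRowSpec_getElem]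
      exact hcell i jj _ _ _ _

lemma aqCellB_cons_of_ne (k c : Int) (v : String) (rest : List (Int × String)) (h : k ≠ c)
    (x : String) :
    aqCellB (PySem.Dict.mk ((k, v) :: rest)) x c = aqCellB (PySem.Dict.mk rest) x c := by
  rw [aqCellB_eq, aqCellB_eq, PySem.Dict.get?_mk_cons]
  simp [show (k == c) = false by simp [h]]

lemma aqCellB_rest_none (k : Int) (rest : List (Int × String)) (hk : k ∉ rest.map Prod.fst)
    (x : String) : aqCellB (PySem.Dict.mk rest) x k = x := by
  rw [aqCellB_eq]
  have hn : (PySem.Dict.mk rest).get? k = none := by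
    rw [PySem.Dict.get?_eq_none_iff_not_mem_keys]
    simpa [PySem.Dict.keys_mk] using hk
  rw [hn]
  split <;> rfl

lemma aqCellB_cons_self (k : Int) (v : String) (rest : List (Int × String))
    (hk : k ∉ rest.map Prod.fst) (x : String) :
    aqCellB (PySem.Dict.mk ((k, v) :: rest)) x k = (if aqSubB x = true then v else x) := by
  rw [aqCellB_eq, PySem.Dict.get?_mk_cons]
  have hn : (PySem.Dict.mk rest).get? k = none := by
    rw [PySem.Dict.get?_eq_none_iff_not_mem_keys]
    simpa [PySem.Dict.keys_mk] using hk
  simp only [beq_self_eq_true, if_true]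
  unfold aqSubB
  rcases hx : (x == "-") with _ | _ <;> simp [hx]

-- a flat position determines its (row, column) uniquely
lemma aqPos_unique (lens : List Nat) (i jj r j : Nat)
    (hi : i < lens.length) (hjj : jj < lens[i]'hi)
    (hr : r < lens.length) (hj : j < lens[r]'hr)
    (h : aqT lens i + (jj : Int) = aqT lens r + (j : Int)) : i = r ∧ jj = j := by
  have hi1 := aqT_succ lens i hi
  have hr1 := aqT_succ lens r hr
  have hir : i = r := by
    apply aqT_unique lens (aqT lens i + (jj : Int)) i r
    · omega
    · omega
    · omega
    · omega
  subst hir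
  omega

-- the cell key 1 + aqT i + jj lies in [1, total]
lemma aqKey_bounds (lens : List Nat) (i jj : Nat) (hi : i < lens.length) (hjj : jj < lens[i]'hi) :
    1 ≤ 1 + aqT lens i + (jj : Int) ∧ 1 + aqT lens i + (jj : Int) ≤ aqT lens lens.length := by
  have h1 := aqT_nonneg lens i
  have h2 := aqT_succ lens i hi
  have h3 := aqT_mono lens (show i + 1 ≤ lens.length by omega)
  omega

lemma aq_set_map_length (q : List (List String)) (r : Nat) (hrq : r < q.length) (row : List String)
    (hrow : row.length = (q[r]'hrq).length) :
    (q.set r row).map List.length = q.map List.length := by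
  apply List.ext_getElem
  · simp
  · intro i h1 h2
    simp only [List.getElem_map, List.getElem_set]
    split
    · next h => subst h; simp [hrow]
    · rfl

lemma aqStep (lens : List Nat) (q : List (List String)) (hq : q.map List.length = lens)
    (k : Int) (v : String) (rest : List (Int × String)) (hk : k ∉ rest.map Prod.fst) :
    aqGridSpec (aqCellB (PySem.Dict.mk rest))
        (aqApply (aqScanN lens 0) (aqT lens lens.length) q (k, v)) 1
      = aqGridSpec (aqCellB (PySem.Dict.mk ((k, v) :: rest))) q 1 := by
  subst hq
  by_cases hvalid : 1 ≤ k ∧ k ≤ aqT (q.map List.length) (q.map List.length).length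
  · obtain ⟨hk1, hk2⟩ := hvalid
    obtain ⟨r, j, hrq, hj, hpos, heq⟩ := aqApply_valid (q.map List.length) q rfl k v hk1 hk2
    have hrl : r < (q.map List.length).length := by simpa using hrq
    have hjl : j < (q.map List.length)[r]'hrl := by simpa using hj
    rw [heq]
    by_cases hsub : aqSubB ((q[r]'hrq)[j]'hj) = true
    · rw [if_pos hsub]
      have hmap := aq_set_map_length q r hrq ((q[r]'hrq).set j v) (by simp)
      apply aqGridSpec_ext
      · simp
      · intro i h1 h2
        simp only [List.getElem_set]
        split
        · next h => subst h; simp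
        · rfl
      · intro i jj h1 h2 g1 g2
        rw [hmap]
        have hil : i < (q.map List.length).length := by simpa using h2
        have hjjl : jj < (q.map List.length)[i]'hil := by simpa using g2
        by_cases hkey : (1 : Int) + aqT (q.map List.length) i + jj = k
        · -- this is exactly the played cell (r, j)
          obtain ⟨hir, hjjj⟩ := aqPos_unique (q.map List.length) i jj r j hil hjjl hrl hjl
            (by omega)
          subst hir; subst hjjj
          have e1 : ((q.set i ((q[i]'hrq).set jj v))[i]'h1)[jj]'g1 = v := by
            simp [List.getElem_set]
          rw [hkey, aqCellB_rest_none k rest hk, aqCellB_cons_self k v rest hk, e1, if_pos hsub]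
        · rw [aqCellB_cons_of_ne k _ v rest (by omega)]
          congr 1
          simp only [List.getElem_set]
          split
          · next h =>
            subst h
            rw [List.getElem_set]
            split
            · next h2 =>
              subst h2
              exfalso; exact hkey (by omega)
            · rfl
          · rfl
    · rw [if_neg hsub]
      apply aqGridSpec_ext _ _ q q 1 rfl (fun _ _ _ => rfl)
      intro i jj h1 h2 g1 g2
      have hil : i < (q.map List.length).length := by simpa using h2
      have hjjl : jj < (q.map List.length)[i]'hil := by simpa using g2
      by_cases hkey : (1 : Int) + aqT (q.map List.length) i + jj = k
      · obtain ⟨hir, hjjj⟩ := aqPos_unique (q.map List.length) i jj r j hil hjjl hrl hjl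
          (by omega)
        subst hir; subst hjjj
        rw [hkey, aqCellB_rest_none k rest hk, aqCellB_cons_self k v rest hk, if_neg hsub]
      · rw [aqCellB_cons_of_ne k _ v rest (by omega)]
  · rw [aqApply_invalid _ _ _ _ _ hvalid]
    apply aqGridSpec_ext _ _ q q 1 rfl (fun _ _ _ => rfl)
    intro i jj h1 h2 g1 g2
    have hil : i < (q.map List.length).length := by simpa using h2
    have hjjl : jj < (q.map List.length)[i]'hil := by simpa using g2
    have hb := aqKey_bounds (q.map List.length) i jj hil hjjl
    rw [aqCellB_cons_of_ne k _ v rest (by omega)]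

lemma aqApply_shape (lens : List Nat) (q : List (List String)) (hq : q.map List.length = lens)
    (k : Int) (v : String) :
    (aqApply (aqScanN lens 0) (aqT lens lens.length) q (k, v)).map List.length = lens := by
  by_cases hvalid : 1 ≤ k ∧ k ≤ aqT lens lens.length
  · obtain ⟨hk1, hk2⟩ := hvalid
    obtain ⟨r, j, hrq, hj, hpos, heq⟩ := aqApply_valid lens q hq k v hk1 hk2
    rw [heq]
    split
    · rw [aq_set_map_length q r hrq _ (by simp)]; exact hq
    · exact hq
  · rw [aqApply_invalid _ _ _ _ _ hvalid]; exact hq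

lemma aqFold (lens : List Nat) (l : List (Int × String)) : ∀ (q : List (List String)),
    (l.map Prod.fst).Nodup → q.map List.length = lens →
    l.foldl (aqApply (aqScanN lens 0) (aqT lens lens.length)) q
      = aqGridSpec (aqCellB (PySem.Dict.mk l)) q 1 := by
  induction l with
  | nil =>
    intro q _ _
    rw [List.foldl_nil, aqGridSpec_empty]
  | cons kv rest ih =>
    intro q hnd hq
    obtain ⟨k, v⟩ := kv
    have hnd' : (rest.map Prod.fst).Nodup := hnd.of_cons
    have hk : k ∉ rest.map Prod.fst := by
      have h2 : (k :: rest.map Prod.fst).Nodup := by simpa using hnd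
      exact (List.nodup_cons.mp h2).1
    rw [List.foldl_cons, ih _ hnd' (aqApply_shape lens q hq k v)]
    exact aqStep lens q hq k v rest hk

-- both ports as the spec grid
lemma aqA_spec (quartos : List (List String)) (jogadas : List (Int × String)) :
    atualiza_quartos quartos jogadas
      = aqGridSpec (aqCellA (PySem.Dict.mk jogadas)) quartos 1 := by
  unfold atualiza_quartos
  rw [aqGridA_eq]

lemma aqB_spec (quartos : List (List String)) (jogadas : List (Int × String))
    (hpre : (jogadas.map Prod.fst).Nodup) :
    atualiza_quartos_alt quartos jogadas
      = aqGridSpec (aqCellB (PySem.Dict.mk jogadas)) quartos 1 := by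
  unfold atualiza_quartos_alt
  have hscan : aqPrefix quartos = aqScanN (quartos.map List.length) 0 := aqPrefix_eq quartos
  have hnn : aqScanN (quartos.map List.length) 0 ≠ [] := by
    intro h
    have := congrArg List.length h
    simp [aqScanN_length] at this
  have htot : PySem.List.pyGetD (aqPrefix quartos) (-1) 0
      = aqT (quartos.map List.length) (quartos.map List.length).length := by
    rw [hscan, PySem.List.pyGetD_neg_one _ _ hnn, aqScanN_getLast]
    ring
  show (PySem.Dict.mk jogadas).items.foldl
      (aqApply (aqPrefix quartos) (PySem.List.pyGetD (aqPrefix quartos) (-1) 0)) quartos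
    = aqGridSpec (aqCellB (PySem.Dict.mk jogadas)) quartos 1
  rw [htot, hscan]
  rw [show (PySem.Dict.mk jogadas).items = jogadas from rfl]
  exact aqFold (quartos.map List.length) jogadas quartos hpre rfl

-- ===== VERDICT (by name: the statements are the Claim_ definitions above) =====
theorem atualiza_quartos_spec : Claim_unchanged_atualiza_quartos := by
  intro quartos jogadas hdom hpre hnd
  unfold Pre_atualiza_quartos at hpre
  show atualiza_quartos quartos jogadas = atualiza_quartos_alt quartos jogadas
  rw [aqA_spec, aqB_spec quartos jogadas hpre]
  apply aqGridSpec_ext _ _ quartos quartos 1 rfl (fun _ _ _ => rfl)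
  intro i jj h1 h2 g1 g2
  apply aqCell_agree
  intro hx
  by_contra hne
  apply hnd
  unfold D_atualiza_quartos
  refine ⟨((quartos.map List.length).take i).sum + jj, aqFlat_bound quartos i h1 jj g1, ?_, ?_⟩
  · rw [aqFlat_getElem quartos i h1 jj g1]; exact hx
  · have hkey : ((((quartos.map List.length).take i).sum + jj : Nat) : Int) + 1
        = 1 + aqT (quartos.map List.length) i + (jj : Int) := by
      simp only [aqT]; push_cast; ring
    rw [hkey]; exact hne

theorem atualiza_quartos_changed : Claim_changed_atualiza_quartos := by
  unfold Claim_changed_atualiza_quartos; decide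

theorem atualiza_quartos_tight : Claim_exact_atualiza_quartos := by
  intro quartos jogadas hdom hpre hD heq
  unfold Pre_atualiza_quartos at hpre
  unfold D_atualiza_quartos at hD
  obtain ⟨p, hp, hcellp, hvalp⟩ := hD
  obtain ⟨i, hi, j, hj, hdec⟩ := aqFlat_decomp quartos p hp
  have hcell : (quartos[i]'hi)[j]'hj = "" := by
    rw [← aqFlat_getElem quartos i hi j hj, ← hdec]; exact hcellp
  have hval : ((PySem.Dict.mk jogadas).get?
      (1 + aqT (quartos.map List.length) i + (j : Int))).getD "" ≠ "" := by
    have hkey : ((p : Nat) : Int) + 1 = 1 + aqT (quartos.map List.length) i + (j : Int) := by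
      rw [hdec]; simp only [aqT]; push_cast; ring
    rw [← hkey]; exact hvalp
  rw [aqA_spec, aqB_spec quartos jogadas hpre] at heq
  have hiA : i < (aqGridSpec (aqCellA (PySem.Dict.mk jogadas)) quartos 1).length := by
    rw [aqGridSpec_length]; exact hi
  have hiB : i < (aqGridSpec (aqCellB (PySem.Dict.mk jogadas)) quartos 1).length := by
    rw [aqGridSpec_length]; exact hi
  have hrow := congrArg (fun l => l.getD i ([] : List String)) heq
  simp only at hrow
  rw [List.getD_eq_getElem _ [] hiA, List.getD_eq_getElem _ [] hiB,
    aqGridSpec_getElem, aqGridSpec_getElem] at hrow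
  have hjA : j < (aqRowSpec (aqCellA (PySem.Dict.mk jogadas)) (quartos[i]'hi)
      (1 + aqT (quartos.map List.length) i)).length := by
    rw [aqRowSpec_length]; exact hj
  have hjB : j < (aqRowSpec (aqCellB (PySem.Dict.mk jogadas)) (quartos[i]'hi)
      (1 + aqT (quartos.map List.length) i)).length := by
    rw [aqRowSpec_length]; exact hj
  have hc := congrArg (fun l => l.getD j ("" : String)) hrow
  simp only at hc
  rw [List.getD_eq_getElem _ "" hjA, List.getD_eq_getElem _ "" hjB,
    aqRowSpec_getElem, aqRowSpec_getElem] at hc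
  rw [hcell] at hc
  rw [aqCellA_eq, aqCellB_eq] at hc
  have hA : PySem.Str.isIn "" "-" = true := by decide
  have hB : (("" : String) == "-") = false := by decide
  rw [hA, hB] at hc
  simp only [if_true, if_neg (by simp : ¬ (false = true))] at hc
  exact hval hc
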